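-- pv_equiv track=rewrite | github.com/Sunshine535/nips-clox | code/question_router.py | assign_best_strategy
-- ===== SOURCE A (Python) =====
-- STRATEGIES = ["standard_cot", "self_consistency", "backward_cloze"]
--
-- def assign_best_strategy(labels: dict) -> str:
--     """Label: which strategy is "best" for this problem.
--
--     Rules (ordered by preference when tied):
--     1. If all three agree correct → SC (since it's standard)
--     2. If only one correct → that one
--     3. If two correct → prefer cheapest (CoT > BC > SC in token cost)
--     """
--     correct_strats = [s for s in STRATEGIES if labels[s]]
--     if not correct_strats:
--         return "none"  # no strategy worked
--     if len(correct_strats) == 3: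
--         return "self_consistency"  # safe default when all agree
--     if len(correct_strats) == 1:
--         return correct_strats[0]
--     # Two correct — prefer cheaper
--     cost = {"standard_cot": 1, "backward_cloze": 4, "self_consistency": 8}
--     return min(correct_strats, key=lambda s: cost[s])
-- ===== SOURCE B (Python) =====
-- STRATEGIES = ["standard_cot", "self_consistency", "backward_cloze"]
--
-- # Dispatch table: (cot, sc, bc) truth pattern -> best strategy.
-- _TABLE = {
--     (False, False, False): "none",
--     (True, False, False): "standard_cot",
--     (False, True, False): "self_consistency",
--     (False, False, True): "backward_cloze",
--     (True, True, False): "standard_cot",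
--     (True, False, True): "standard_cot",
--     (False, True, True): "backward_cloze",
--     (True, True, True): "self_consistency",
-- }
--
-- def assign_best_strategy(labels: dict) -> str:
--     key = tuple(bool(labels[s]) for s in STRATEGIES)
--     return _TABLE[key]
-- ===== Notes on version B (the rewrite author's own statement) =====
-- stated objective: simpler
-- what changed: Replaces the filter/length-branching/min-by-cost classification with a single precomputed 8-entry dispatch table keyed by the tuple of the three correctness booleans.
import Mathlib
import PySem

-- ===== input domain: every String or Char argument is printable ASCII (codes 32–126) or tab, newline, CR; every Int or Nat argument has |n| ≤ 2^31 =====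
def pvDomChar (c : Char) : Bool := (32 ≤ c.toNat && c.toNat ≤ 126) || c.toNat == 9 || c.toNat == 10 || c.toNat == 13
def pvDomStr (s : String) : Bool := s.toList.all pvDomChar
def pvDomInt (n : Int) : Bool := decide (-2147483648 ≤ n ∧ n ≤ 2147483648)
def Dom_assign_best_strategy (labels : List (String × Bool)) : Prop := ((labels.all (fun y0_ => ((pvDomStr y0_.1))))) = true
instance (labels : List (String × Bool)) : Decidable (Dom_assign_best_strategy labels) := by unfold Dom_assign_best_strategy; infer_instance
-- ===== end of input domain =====

-- B replaces the filter/length-branch/min-by-cost classification with a single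
-- precomputed 8-entry dispatch table keyed by the three truth values (objective: simpler).

-- ===== PORT A =====
def pyStrategies : List String := ["standard_cot", "self_consistency", "backward_cloze"]

def assign_best_strategy (labels : List (String × Bool)) : String :=
  let correct_strats := pyStrategies.filter (fun s => (labels.lookup s).getD false)
  if correct_strats = [] then "none"
  else if correct_strats.length = 3 then "self_consistency"
  else if correct_strats.length = 1 then correct_strats.headD ""
  else
    let cost : List (String × Int) :=
      [("standard_cot", 1), ("backward_cloze", 4), ("self_consistency", 8)]
    (PySem.List.min? correct_strats (fun s => (cost.lookup s).getD 0)).getD ""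

-- ===== PORT B =====
def pyDispatchTable : List ((Bool × Bool × Bool) × String) :=
  [((false, false, false), "none"),
   ((true,  false, false), "standard_cot"),
   ((false, true,  false), "self_consistency"),
   ((false, false, true ), "backward_cloze"),
   ((true,  true,  false), "standard_cot"),
   ((true,  false, true ), "standard_cot"),
   ((false, true,  true ), "backward_cloze"),
   ((true,  true,  true ), "self_consistency")]

def assign_best_strategy_alt (labels : List (String × Bool)) : String :=
  let key := ((labels.lookup "standard_cot").getD false,
              (labels.lookup "self_consistency").getD false,
              (labels.lookup "backward_cloze").getD false)
  (pyDispatchTable.lookup key).getD ""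

-- ===== PRECONDITION & SPEC =====
-- Pre_ excludes dicts missing one of the three strategy keys, on which A raises KeyError.
def Pre_assign_best_strategy (labels : List (String × Bool)) : Prop :=
  "standard_cot" ∈ labels.map Prod.fst ∧ "self_consistency" ∈ labels.map Prod.fst ∧
  "backward_cloze" ∈ labels.map Prod.fst
instance (labels : List (String × Bool)) : Decidable (Pre_assign_best_strategy labels) := by
  unfold Pre_assign_best_strategy; infer_instance

def pvWitness_assign_best_strategy : (List (String × Bool)) :=
  [("standard_cot", true), ("self_consistency", false), ("backward_cloze", true)]

def Spec_assign_best_strategy (labels : List (String × Bool)) (out : String) : Prop := out = assign_best_strategy_alt labels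
instance (labels : List (String × Bool)) (out : String) : Decidable (Spec_assign_best_strategy labels out) := by unfold Spec_assign_best_strategy; infer_instance

-- ===== CLAIM (what is proved, stated in full; the proofs are below) =====
def Claim_equal_assign_best_strategy : Prop := ∀ (labels : List (String × Bool)), Dom_assign_best_strategy labels → Pre_assign_best_strategy labels → Spec_assign_best_strategy labels (assign_best_strategy labels)

-- ===== LEMMAS AND PROOFS =====
theorem assign_best_strategy_key (b1 b2 b3 : Bool) (labels : List (String × Bool))
    (h1 : (labels.lookup "standard_cot").getD false = b1)
    (h2 : (labels.lookup "self_consistency").getD false = b2)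
    (h3 : (labels.lookup "backward_cloze").getD false = b3) :
    assign_best_strategy labels = assign_best_strategy_alt labels := by
  unfold assign_best_strategy assign_best_strategy_alt pyStrategies pyDispatchTable
  rw [show (fun s => ((List.lookup s labels).getD false)) = (fun s => if s = "standard_cot" then b1 else if s = "self_consistency" then b2 else if s = "backward_cloze" then b3 else (List.lookup s labels).getD false) from funext fun s => by split_ifs with e1 e2 e3 <;> simp_all, h1, h2, h3]
  cases b1 <;> cases b2 <;> cases b3 <;> rfl

-- ===== VERDICT (by name: the statement is the Claim_ definition above) =====
theorem assign_best_strategy_spec : Claim_equal_assign_best_strategy := by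
  intro labels _ _
  exact assign_best_strategy_key _ _ _ labels rfl rfl rfl
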